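-- pv_equiv track=rewrite | github.com/xrun1018/MIT_6.042J | code_implementaion/Recursive Definition/string.py | defineString
-- ===== SOURCE A (Python) =====
-- def defineString(s):
--     """Input: s is a string.
--     Return the definition of that string"""
--     try:
--         assert type(s) == str
--     except AssertionError:
--         s = str(s)
--     if s == '':
--         return s
--     return '<' + s[0] + ',' + defineString(s[1:]) + '>'
-- ===== SOURCE B (Python) =====
-- def defineString(s):
--     """Input: s is a string.
--     Return the definition of that string"""
--     try:
--         assert type(s) == str
--     except AssertionError:
--         s = str(s)
--     result = ''
--     for c in reversed(s):
--         result = '<' + c + ',' + result + '>'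
--     return result
-- ===== Notes on version B (the rewrite author's own statement) =====
-- stated objective: alternative
-- what changed: Replaces the tail recursion (peel first char, recurse on the suffix) with an iterative right-to-left accumulation loop over reversed(s).
import Mathlib
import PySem

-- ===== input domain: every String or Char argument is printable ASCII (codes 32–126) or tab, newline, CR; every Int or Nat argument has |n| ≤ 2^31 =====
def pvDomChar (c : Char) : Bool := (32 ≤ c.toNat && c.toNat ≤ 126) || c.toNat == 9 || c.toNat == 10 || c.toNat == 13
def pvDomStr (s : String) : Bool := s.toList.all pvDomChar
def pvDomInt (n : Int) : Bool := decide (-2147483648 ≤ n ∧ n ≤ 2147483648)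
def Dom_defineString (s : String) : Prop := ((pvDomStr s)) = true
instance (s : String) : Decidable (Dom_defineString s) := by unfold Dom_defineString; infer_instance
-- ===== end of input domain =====

-- B replaces A's tail recursion with an iterative right-to-left accumulation loop (alternative decomposition).

-- ===== PORT A =====
-- A's recursion, over List Char (exact for the ASCII domain): '' → '', else '<' + s[0] + ',' + defineString(s[1:]) + '>'
def defineStringGo : List Char → List Char
  | [] => []
  | c :: rest => '<' :: c :: ',' :: (defineStringGo rest ++ ['>'])

def defineString (s : String) : String := String.mk (defineStringGo s.toList)

-- ===== PORT B =====
-- B's loop: result = ''; for c in reversed(s): result = '<' + c + ',' + result + '>'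
def defineString_alt (s : String) : String :=
  String.mk (s.toList.reverse.foldl (fun result c => '<' :: c :: ',' :: (result ++ ['>'])) [])

-- ===== PRECONDITION & SPEC =====
def Spec_defineString (s : String) (out : String) : Prop := out = defineString_alt s
instance (s : String) (out : String) : Decidable (Spec_defineString s out) := by unfold Spec_defineString; infer_instance

-- ===== CLAIM (what is proved, stated in full; the proofs are below) =====
def Claim_equal_defineString : Prop := ∀ (s : String), Dom_defineString s → Spec_defineString s (defineString s)

-- ===== LEMMAS AND PROOFS =====
theorem defineString_foldl_eq (l : List Char) :
    l.reverse.foldl (fun result c => '<' :: c :: ',' :: (result ++ ['>'])) [] = defineStringGo l := by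
  rw [List.foldl_reverse]
  induction l with
  | nil => rfl
  | cons c rest ih => simp [defineStringGo, ih]

-- ===== VERDICT (by name: the statement is the Claim_ definition above) =====
theorem defineString_spec : Claim_equal_defineString := by
  intro s _
  unfold Spec_defineString defineString defineString_alt
  rw [defineString_foldl_eq]
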